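-- pv_equiv track=rewrite | github.com/taasaa/bench | scorers/exec_scorer.py | _extract_asserts
-- ===== SOURCE A (Python) =====
-- def _extract_asserts(text: str) -> list[str]:
--     """Extract assert lines from text, preferring code fence contents."""
--     lines = text.split("\n")
--     in_code = False
--     code_lines: list[str] = []
--     for line in lines:
--         if line.strip().startswith("```"):
--             in_code = not in_code
--             continue
--         if in_code:
--             code_lines.append(line)
--     source = code_lines if code_lines else lines
--     return [line.strip() for line in source if line.strip().startswith("assert ")]
-- ===== SOURCE B (Python) =====
-- def _extract_asserts(text: str) -> list[str]:
--     """Extract assert lines from text, preferring code fence contents."""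
--     lines = text.split("\n")
--     # staged passes: record every fence line's index, then take the lines
--     # strictly between consecutive (open, close) index pairs; an unmatched
--     # trailing fence opens a block running to the end of the input.
--     fences = [i for i, line in enumerate(lines) if line.strip().startswith("```")]
--     code_lines: list[str] = []
--     f = fences
--     while len(f) >= 2:
--         code_lines.extend(lines[f[0] + 1 : f[1]])
--         f = f[2:]
--     if f:
--         code_lines.extend(lines[f[0] + 1 :])
--     source = code_lines if code_lines else lines
--     return [line.strip() for line in source if line.strip().startswith("assert ")]
-- ===== Notes on version B (the rewrite author's own statement) =====
-- stated objective: alternative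
-- what changed: Replaced A's single stateful toggle loop with two staged passes: first collect the indices of all fence lines, then consume that index list two at a time, slicing out the lines strictly between each (open, close) pair (a leftover unmatched index slices to the end); the fallback and assert filter are unchanged.
import Mathlib
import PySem

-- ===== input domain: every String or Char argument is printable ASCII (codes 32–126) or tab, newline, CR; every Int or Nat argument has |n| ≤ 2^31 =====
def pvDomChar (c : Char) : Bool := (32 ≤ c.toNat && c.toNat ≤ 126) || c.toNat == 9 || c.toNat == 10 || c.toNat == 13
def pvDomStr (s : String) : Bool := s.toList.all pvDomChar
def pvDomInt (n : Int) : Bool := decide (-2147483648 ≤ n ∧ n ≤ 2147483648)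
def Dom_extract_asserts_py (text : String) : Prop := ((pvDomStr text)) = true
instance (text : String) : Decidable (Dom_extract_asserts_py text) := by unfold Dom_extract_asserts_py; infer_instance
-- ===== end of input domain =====

-- B replaces A's single toggle-state loop by two staged passes: collect all fence-line
-- indices, then consume that index list two at a time, slicing out the lines between
-- each (open, close) pair (alternative decomposition, same O(n) cost).


-- line.strip().startswith("```")
def pvIsFence (l : String) : Bool := PySem.Str.startswith (PySem.Str.strip l) "```"

-- ===== PORT A =====
def extract_asserts_py (text : String) : List String :=
  let lines := (PySem.Str.split? text "\n").getD []
  let st := lines.foldl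
    (fun (st : Bool × List String) line =>
      if pvIsFence line then (!st.1, st.2)
      else if st.1 then (st.1, st.2 ++ [line]) else st)
    (false, [])
  let source := if st.2 ≠ [] then st.2 else lines
  (source.filter (fun l => PySem.Str.startswith (PySem.Str.strip l) "assert ")).map
    PySem.Str.strip

-- ===== PORT B =====
-- Source B's while loop: consume the fence-index list two at a time
-- (`lines[f[0]+1:f[1]]` per pair; a leftover single index slices to the end).
def pvFromPairs (lines : List String) : List Int → List String
  | i :: j :: rest =>
      PySem.List.slice lines (some (i + 1)) (some j) ++ pvFromPairs lines rest
  | [i] => PySem.List.slice lines (some (i + 1)) none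
  | [] => []

def extract_asserts_py_alt (text : String) : List String :=
  let lines := (PySem.Str.split? text "\n").getD []
  let fences :=
    ((PySem.List.enumerate lines 0).filter (fun p => pvIsFence p.2)).map (fun p => p.1)
  let code_lines := pvFromPairs lines fences
  let source := if code_lines ≠ [] then code_lines else lines
  (source.filter (fun l => PySem.Str.startswith (PySem.Str.strip l) "assert ")).map
    PySem.Str.strip

-- ===== PRECONDITION & SPEC =====
def Spec_extract_asserts_py (text : String) (out : List String) : Prop := out = extract_asserts_py_alt text
instance (text : String) (out : List String) : Decidable (Spec_extract_asserts_py text out) := by unfold Spec_extract_asserts_py; infer_instance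

-- ===== CLAIM (what is proved, stated in full; the proofs are below) =====
def Claim_equal_extract_asserts_py : Prop := ∀ (text : String), Dom_extract_asserts_py text → Spec_extract_asserts_py text (extract_asserts_py text)

-- ===== LEMMAS AND PROOFS =====

-- Proof-only middle form: A's toggle loop, written as a nested scan-to-closing-fence.
def pvScanClose : List String → List String × List String
  | [] => ([], [])
  | l :: rest =>
    if pvIsFence l then ([], rest)
    else
      let p := pvScanClose rest
      (l :: p.1, p.2)

theorem pvScanClose_len (ls : List String) : (pvScanClose ls).2.length ≤ ls.length := by
  induction ls with
  | nil => simp [pvScanClose]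
  | cons l rest ih =>
    simp only [pvScanClose]
    split
    · simp
    · simpa using Nat.le_succ_of_le ih

def pvCollect : List String → List String
  | [] => []
  | l :: rest =>
    if pvIsFence l then
      let p := pvScanClose rest
      p.1 ++ pvCollect p.2
    else pvCollect rest
termination_by ls => ls.length
decreasing_by
  · exact Nat.lt_succ_of_le (pvScanClose_len rest)
  · simp

-- A's toggle fold, from either state, computes pvCollect.
theorem pvFold_eq (ls : List String) :
    (∀ acc : List String,
      (ls.foldl
        (fun (st : Bool × List String) line =>
          if pvIsFence line then (!st.1, st.2)
          else if st.1 then (st.1, st.2 ++ [line]) else st)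
        (false, acc)).2 = acc ++ pvCollect ls) ∧
    (∀ acc : List String,
      (ls.foldl
        (fun (st : Bool × List String) line =>
          if pvIsFence line then (!st.1, st.2)
          else if st.1 then (st.1, st.2 ++ [line]) else st)
        (true, acc)).2
        = (acc ++ (pvScanClose ls).1) ++ pvCollect (pvScanClose ls).2) := by
  induction ls with
  | nil => simp [pvCollect, pvScanClose]
  | cons l rest ih =>
    obtain ⟨ih0, ih1⟩ := ih
    constructor
    · intro acc
      by_cases h : pvIsFence l = true
      · simp only [List.foldl_cons, h, if_pos, Bool.not_false]
        rw [ih1 acc, pvCollect]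
        simp [h]
      · simp only [List.foldl_cons, h, Bool.false_eq_true, if_false]
        rw [ih0 acc, pvCollect]
        simp [h]
    · intro acc
      by_cases h : pvIsFence l = true
      · simp only [List.foldl_cons, h, if_pos, Bool.not_true]
        rw [ih0 acc, pvScanClose]
        simp [h]
      · simp only [List.foldl_cons, h, Bool.false_eq_true, if_false, if_pos]
        rw [ih1 (acc ++ [l]), pvScanClose]
        simp [h]

-- Proof-only spec of B's fence-index pass: indices (from k) of the fence lines.
def pvFIdx (k : Nat) : List String → List Nat
  | [] => []
  | l :: rest => if pvIsFence l then k :: pvFIdx (k + 1) rest else pvFIdx (k + 1) rest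

-- B's enumerate+filter+map comprehension computes pvFIdx.
theorem pvFences_eq (ls : List String) : ∀ (k : Nat),
    ((PySem.List.enumerate ls (k : Int)).filter (fun p => pvIsFence p.2)).map (fun p => p.1)
      = (pvFIdx k ls).map (fun n : Nat => (n : Int)) := by
  induction ls with
  | nil => intro k; simp [PySem.List.enumerate_nil, pvFIdx]
  | cons l rest ih =>
    intro k
    rw [PySem.List.enumerate_cons]
    by_cases h : pvIsFence l = true
    · simp only [List.filter_cons, h, List.map_cons, pvFIdx, if_pos]
      have := ih (k + 1)
      push_cast at this ⊢
      simp [this]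
    · simp only [List.filter_cons, h, pvFIdx, Bool.false_eq_true]
      have := ih (k + 1)
      push_cast at this ⊢
      simp [this]

theorem pvNoFence (ls : List String) : ∀ (k : Nat), pvFIdx k ls = [] →
    pvScanClose ls = (ls, []) := by
  induction ls with
  | nil => intro k _; rfl
  | cons l rest ih =>
    intro k hf
    by_cases h : pvIsFence l = true
    · simp [pvFIdx, h] at hf
    · simp only [pvFIdx, h, Bool.false_eq_true, if_false] at hf
      simp [pvScanClose, h, ih (k + 1) hf]

theorem pvFIdx_cons (ls : List String) : ∀ (k j : Nat) (t : List Nat),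
    pvFIdx k ls = j :: t →
    k ≤ j ∧ (pvScanClose ls).1 = ls.take (j - k) ∧
    (pvScanClose ls).2 = ls.drop (j - k + 1) ∧
    t = pvFIdx (j + 1) (pvScanClose ls).2 := by
  induction ls with
  | nil => intro k j t h; simp [pvFIdx] at h
  | cons l rest ih =>
    intro k j t h
    by_cases hf : pvIsFence l = true
    · simp only [pvFIdx, hf, if_pos, List.cons.injEq] at h
      obtain ⟨rfl, rfl⟩ := h
      refine ⟨le_refl _, ?_, ?_, ?_⟩ <;> simp [pvScanClose, hf]
    · simp only [pvFIdx, hf, Bool.false_eq_true, if_false] at h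
      obtain ⟨hk, h1, h2, h3⟩ := ih (k + 1) j t h
      have hjk : 1 ≤ j - k ∧ j - (k + 1) = j - k - 1 ∧ j - k - 1 + 1 = j - k := by omega
      refine ⟨by omega, ?_, ?_, ?_⟩
      · simp only [pvScanClose, hf, Bool.false_eq_true, if_false]
        rw [show j - k = (j - (k + 1)) + 1 by omega, List.take_succ_cons, h1]
      · simp only [pvScanClose, hf, Bool.false_eq_true, if_false]
        rw [h2]
        rw [show j - k + 1 = (j - (k + 1) + 1) + 1 by omega, List.drop_succ_cons]
      · simpa [pvScanClose, hf] using h3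

-- B's pair-consuming loop over the fence indices of ls computes pvCollect ls.
set_option maxHeartbeats 1000000 in
theorem pvPairs_eq (n : Nat) : ∀ (ls full : List String) (k : Nat),
    ls.length ≤ n → full.drop k = ls →
    pvFromPairs full ((pvFIdx k ls).map (fun m : Nat => (m : Int))) = pvCollect ls := by
  induction n with
  | zero =>
    intro ls full k hn hd
    have : ls = [] := List.eq_nil_of_length_eq_zero (by omega)
    subst this; simp [pvFIdx, pvFromPairs, pvCollect]
  | succ n ih =>
    intro ls full k hn hd
    match ls, hd with
    | [], hd => simp [pvFIdx, pvFromPairs, pvCollect]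
    | l :: rest, hd =>
      have hrest : full.drop (k + 1) = rest := by
        have h1 := congrArg (List.drop 1) hd
        simpa [List.drop_drop, Nat.add_comm] using h1
      by_cases hf : pvIsFence l = true
      · rw [pvCollect]
        simp only [hf, if_pos]
        rw [pvFIdx]
        simp only [hf, if_pos]
        cases hrt : pvFIdx (k + 1) rest with
        | nil =>
          have hsc := pvNoFence rest (k + 1) hrt
          simp only [List.map_cons, List.map_nil, pvFromPairs]
          rw [show ((k : Int) + 1) = ((k + 1 : Nat) : Int) by push_cast; ring,
            PySem.List.slice_from_natCast, hrest, hsc]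
          simp [pvCollect]
        | cons j t =>
          obtain ⟨hkj, h1, h2, h3⟩ := pvFIdx_cons rest (k + 1) j t hrt
          simp only [List.map_cons, pvFromPairs]
          rw [show ((k : Int) + 1) = ((k + 1 : Nat) : Int) by push_cast; ring,
            PySem.List.slice_natCast, hrest, h1]
          congr 1
          have hd2 : full.drop (j + 1) = (pvScanClose rest).2 := by
            rw [h2, ← hrest, List.drop_drop]
            congr 1
            omega
          have hlen : (pvScanClose rest).2.length ≤ n := by
            have := pvScanClose_len rest
            have : (pvScanClose rest).2.length ≤ rest.length := this
            simp only [List.length_cons] at hn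
            omega
          rw [h3, ih (pvScanClose rest).2 full (j + 1) hlen hd2]
      · rw [pvCollect]
        simp only [hf, Bool.false_eq_true, if_false]
        rw [pvFIdx]
        simp only [hf, Bool.false_eq_true, if_false]
        have hlen : rest.length ≤ n := by simp only [List.length_cons] at hn; omega
        exact ih rest full (k + 1) hlen hrest

-- ===== VERDICT (by name: the statement is the Claim_ definition above) =====
theorem extract_asserts_py_spec : Claim_equal_extract_asserts_py := by
  intro text _
  unfold Spec_extract_asserts_py extract_asserts_py extract_asserts_py_alt
  simp only []
  rw [(pvFold_eq ((PySem.Str.split? text "\n").getD [])).1 []]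
  rw [show ((0 : Int)) = ((0 : Nat) : Int) by rfl, pvFences_eq]
  rw [pvPairs_eq ((PySem.Str.split? text "\n").getD []).length _ _ 0 (le_refl _) (by simp)]
  simp
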